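-- pv_equiv track=rewrite | github.com/Kright/ignis-utils | epoi_converter/convert.py | convert_names
-- ===== SOURCE A (Python) =====
-- from typing import List, Tuple, Dict, Set
--
-- valid_name_chars: List[str] = list("qwertyuiopasdfghjklzxcvbnm1234567890_")
--
-- def filter_valid_chars(name: str) -> str:
--     return "".join(c for c in name if c in valid_name_chars)
--
-- def is_already_numbered(name: str) -> bool:
--     if len(name) < 3: return False
--     return name[0].isdigit() and name[1].isdigit() and name[2] == "_" and filter_valid_chars(name) == name
--
-- def convert_names(images: List[str]) -> Dict[str, str]:
--     used_numbers: Set[int] = set()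
--     result: Dict[str, str] = {}
--
--     def find_free_number(used: Set[int]):
--         for i in range(100):
--             if i not in used:
--                 return i
--         return 100
--
--     for image in images:
--         if is_already_numbered(image):
--             result[image] = image
--             number = int(image[:2])
--             used_numbers.add(number)
--
--     for image in images:
--         if image not in result:
--             free_number = find_free_number(used_numbers)
--             assert free_number <= 99, "images count > 99"
--             result[image] = f"{free_number:02}_{filter_valid_chars(image)[:13]}"
--             used_numbers.add(free_number)
--
--     return result
-- ===== SOURCE B (Python) =====
-- from typing import List, Dict
--
-- _VALID_CHARS = frozenset("qwertyuiopasdfghjklzxcvbnm1234567890_")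
--
-- def _clean(name: str) -> str:
--     return "".join(c for c in name if c in _VALID_CHARS)
--
-- def _is_numbered(name: str) -> bool:
--     return (len(name) >= 3 and name[0].isdigit() and name[1].isdigit()
--             and name[2] == "_" and _clean(name) == name)
--
-- def convert_names(images: List[str]) -> Dict[str, str]:
--     kept = {img: img for img in images if _is_numbered(img)}
--     used = {int(img[:2]) for img in kept}
--     fresh = list(dict.fromkeys(img for img in images if img not in kept))
--     free = [i for i in range(100) if i not in used]
--     assert len(fresh) <= len(free), "images count > 99"
--     return kept | {img: f"{n:02}_{_clean(img)[:13]}" for img, n in zip(fresh, free)}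
-- ===== Notes on version B (the rewrite author's own statement) =====
-- stated objective: simpler
-- what changed: B replaces A's mutable two-pass loop with its per-image rescan of 0..99 (find_free_number) by a declarative construction: comprehensions build the kept dict, the used-number set, the ordered deduplicated list of fresh images and the ordered list of free numbers once, and the result is the kept dict merged with a zip of fresh images against free numbers.
import Mathlib
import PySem

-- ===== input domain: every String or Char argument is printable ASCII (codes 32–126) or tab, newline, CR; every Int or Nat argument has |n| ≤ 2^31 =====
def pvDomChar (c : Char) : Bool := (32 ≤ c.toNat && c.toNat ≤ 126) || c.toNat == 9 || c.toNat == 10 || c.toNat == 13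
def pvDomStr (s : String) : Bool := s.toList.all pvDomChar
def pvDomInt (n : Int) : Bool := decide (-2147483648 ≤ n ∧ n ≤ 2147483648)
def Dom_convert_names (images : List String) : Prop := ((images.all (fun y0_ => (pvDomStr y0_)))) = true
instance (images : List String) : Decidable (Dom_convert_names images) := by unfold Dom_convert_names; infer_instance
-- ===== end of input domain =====

-- B changes the algorithm (comprehensions + zip of fresh images against the precomputed free-number list,
-- instead of A's mutable two-pass loop rescanning 0..99 per assignment); objective: simpler. Equal return values on Pre_.

-- ===== PORT A =====
def valid_name_chars : List Char := "qwertyuiopasdfghjklzxcvbnm1234567890_".toList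

def filter_valid_chars (name : String) : String :=
  String.mk (name.toList.filter (fun c => valid_name_chars.contains c))

def is_already_numbered (name : String) : Bool :=
  if name.toList.length < 3 then false
  else
    (PySem.Chars.isdigit ((name.toList.headI)) &&
     PySem.Chars.isdigit ((name.toList.tail).headI) &&
     (((name.toList.tail).tail).headI == '_') &&
     (filter_valid_chars name == name))

-- int(image[:2]); guarded by is_already_numbered, the parse always succeeds (getD 0 unreachable)
def parse2 (image : String) : Int :=
  (PySem.Int.ofChars? (PySem.List.slice image.toList none (some 2))).getD 0

-- f"{n:02}_{filter_valid_chars(image)[:13]}"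
def newName (n : Int) (image : String) : String :=
  String.mk (PySem.Chars.zfill (PySem.Int.toChars n) 2 ++ '_' ::
    PySem.List.slice (filter_valid_chars image).toList none (some 13))

-- for i in range(100): if i not in used: return i; return 100
def find_free_number (used : PySem.Set Int) : Int :=
  match (PySem.List.pyRange 0 100 1).find? (fun i => !(PySem.Set.contains used i)) with
  | some i => i
  | none => 100

def convert_names (images : List String) : List (String × String) :=
  let st1 : PySem.Set Int × PySem.Dict String String :=
    images.foldl (fun st image =>
      if is_already_numbered image then
        (PySem.Set.add st.1 (parse2 image), st.2.insert image image)
      else st) (PySem.Set.empty, PySem.Dict.empty)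
  let st2 : PySem.Set Int × PySem.Dict String String :=
    images.foldl (fun st image =>
      if st.2.contains image then st
      else
        let free_number := find_free_number st.1
        -- assert free_number <= 99 raises exactly outside Pre_; the port continues there
        (PySem.Set.add st.1 free_number, st.2.insert image (newName free_number image))) st1
  st2.2.items

-- ===== PORT B =====
def valid_set : PySem.Set Char := PySem.Set.ofList "qwertyuiopasdfghjklzxcvbnm1234567890_".toList

def clean_alt (name : String) : String :=
  String.mk (name.toList.filter (fun c => PySem.Set.contains valid_set c))

def is_numbered_alt (name : String) : Bool :=
  decide (3 ≤ name.toList.length) &&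
  PySem.Chars.isdigit ((name.toList.headI)) &&
  PySem.Chars.isdigit ((name.toList.tail).headI) &&
  (((name.toList.tail).tail).headI == '_') &&
  (clean_alt name == name)

def parse2_alt (image : String) : Int :=
  (PySem.Int.ofChars? (PySem.List.slice image.toList none (some 2))).getD 0

def newName_alt (n : Int) (image : String) : String :=
  String.mk (PySem.Chars.zfill (PySem.Int.toChars n) 2 ++ '_' ::
    PySem.List.slice (clean_alt image).toList none (some 13))

def convert_names_alt (images : List String) : List (String × String) :=
  let kept : PySem.Dict String String :=
    images.foldl (fun d img => if is_numbered_alt img then d.insert img img else d)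
      PySem.Dict.empty
  let used : PySem.Set Int := PySem.Set.ofList (kept.keys.map parse2_alt)
  let fresh : List String := PySem.Set.ofList (images.filter (fun img => !(kept.contains img)))
  let free : List Int :=
    (PySem.List.pyRange 0 100 1).filter (fun i => !(PySem.Set.contains used i))
  -- assert len(fresh) <= len(free) raises exactly outside Pre_; the port continues (zip truncates)
  kept.items ++ (fresh.zip free).map (fun p => (p.1, newName_alt p.2 p.1))

-- ===== PRECONDITION & SPEC =====
-- Pre_ excludes exactly the inputs on which A's `assert free_number <= 99` raises AssertionError:
-- those with more distinct not-already-numbered images than free two-digit numbers.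
def Pre_convert_names (images : List String) : Prop :=
  (PySem.Set.ofList (images.filter (fun img => !(is_already_numbered img)))).length
    + (PySem.Set.ofList ((images.filter (fun img => is_already_numbered img)).map parse2)).length
    ≤ 100

instance (images : List String) : Decidable (Pre_convert_names images) := by
  unfold Pre_convert_names; infer_instance

def pvWitness_convert_names : List String := ["01_cat", "dog house", "01_cat", "dog house!"]

def Spec_convert_names (images : List String) (out : List (String × String)) : Prop :=
  out = convert_names_alt images
instance (images : List String) (out : List (String × String)) : Decidable (Spec_convert_names images out) := by
  unfold Spec_convert_names; infer_instance

-- ===== CLAIM (what is proved, stated in full; the proofs are below) =====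
def Claim_equal_convert_names : Prop :=
  ∀ (images : List String), Dom_convert_names images → Pre_convert_names images →
    Spec_convert_names images (convert_names images)

-- ===== LEMMAS AND PROOFS =====

-- the free numbers still available given the used-set u
def freeOf (u : PySem.Set Int) : List Int :=
  (PySem.List.pyRange 0 100 1).filter (fun i => !(PySem.Set.contains u i))

theorem clean_eq (name : String) : clean_alt name = filter_valid_chars name := by
  unfold clean_alt filter_valid_chars
  congr 1

theorem numbered_eq : is_numbered_alt = is_already_numbered := by
  funext name
  unfold is_numbered_alt is_already_numbered
  rw [clean_eq]
  by_cases h : name.toList.length < 3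
  · rw [if_pos h]
    have hd : decide (3 ≤ name.toList.length) = false := by
      simp only [decide_eq_false_iff_not]; omega
    rw [hd]; simp
  · rw [if_neg h]
    have hd : decide (3 ≤ name.toList.length) = true := by
      simp only [decide_eq_true_eq]; omega
    rw [hd]; simp [Bool.and_assoc]

theorem parse_eq : parse2_alt = parse2 := rfl

theorem contains_add_eq (s : PySem.Set Int) (x y : Int) :
    PySem.Set.contains (PySem.Set.add s x) y = (PySem.Set.contains s y || y == x) := by
  rw [Bool.eq_iff_iff]
  simp only [Bool.or_eq_true, beq_iff_eq, PySem.Set.contains_iff]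
  exact PySem.Set.mem_add (s := s) (x := x) (y := y)

theorem contains_congr {s t : PySem.Set Int} (h : ∀ i, i ∈ s ↔ i ∈ t) (i : Int) :
    PySem.Set.contains s i = PySem.Set.contains t i := by
  rw [Bool.eq_iff_iff, PySem.Set.contains_iff, PySem.Set.contains_iff]
  exact h i

theorem discard_eq_filter {α : Type} [BEq α] (s : PySem.Set α) (x : α) :
    PySem.Set.discard s x = s.filter (fun y => !(y == x)) := rfl

theorem ofList_filter_ne {α : Type} [BEq α] [LawfulBEq α] (l : List α) (x : α) :
    PySem.Set.ofList (l.filter (fun y => !(y == x)))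
      = (PySem.Set.ofList l).filter (fun y => !(y == x)) := by
  induction l with
  | nil => rfl
  | cons a t ih =>
    by_cases hax : (a == x) = true
    · have ha : a = x := eq_of_beq hax
      rw [List.filter_cons]
      simp only [hax, Bool.not_true, Bool.false_eq_true, if_false]
      rw [PySem.Set.ofList_cons, discard_eq_filter, List.filter_cons]
      simp only [hax, Bool.not_true, Bool.false_eq_true, if_false]
      rw [ih, List.filter_filter]
      subst ha
      apply (List.filter_congr ?_).symm
      intro y _
      cases h : (y == a) <;> simp
    · have hax' : (!(a == x)) = true := by simp [hax]
      rw [List.filter_cons]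
      simp only [hax', if_true]
      rw [PySem.Set.ofList_cons, PySem.Set.ofList_cons, discard_eq_filter,
        discard_eq_filter, List.filter_cons]
      simp only [hax', if_true]
      rw [ih, List.filter_filter, List.filter_filter]
      congr 1
      apply List.filter_congr
      intro y _
      rw [Bool.and_comm]

theorem nodup_length_le (l s : List Int) (h : l.Nodup) (hs : l ⊆ s) :
    l.length ≤ s.length := by
  calc l.length = l.toFinset.card := (List.toFinset_card_of_nodup h).symm
    _ ≤ s.toFinset.card := Finset.card_le_card (by intro x hx; simp at hx ⊢; exact hs hx)
    _ ≤ s.length := s.toFinset_card_le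

theorem length_freeOf_ge (u : PySem.Set Int) :
    100 - u.length ≤ (freeOf u).length := by
  unfold freeOf
  have hsplit := (List.length_eq_length_filter_add
    (l := PySem.List.pyRange 0 100 1) (fun i => PySem.Set.contains u i)).symm
  have hlen : (PySem.List.pyRange 0 100 1).length = 100 := by decide
  have hin : (PySem.List.pyRange 0 100 1).filter (fun i => PySem.Set.contains u i) ⊆ u := by
    intro x hx
    have := List.of_mem_filter hx
    rwa [PySem.Set.contains_iff] at this
  have hnd : ((PySem.List.pyRange 0 100 1).filter (fun i => PySem.Set.contains u i)).Nodup :=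
    (PySem.List.nodup_pyRange_one 0 100).filter _
  have h1 := nodup_length_le _ _ hnd hin
  omega

-- pass 1 of A splits into two independent folds
theorem pass1_split (l : List String) (u : PySem.Set Int) (d : PySem.Dict String String) :
    l.foldl (fun st image =>
      if is_already_numbered image then
        (PySem.Set.add st.1 (parse2 image), st.2.insert image image)
      else st) (u, d)
    = (l.foldl (fun u image =>
          if is_already_numbered image then PySem.Set.add u (parse2 image) else u) u,
       l.foldl (fun d image =>
          if is_already_numbered image then d.insert image image else d) d) := by
  induction l generalizing u d with
  | nil => rfl
  | cons a t ih =>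
    simp only [List.foldl_cons]
    by_cases h : is_already_numbered a
    · simp only [h, if_true]; exact ih _ _
    · simp only [h]; exact ih _ _

-- pass 2 of A appends, in order, the fresh images paired with the free numbers
theorem pass2_items (imgs : List String) (u : PySem.Set Int) (r : PySem.Dict String String)
    (hnd : r.keys.Nodup)
    (hlen : (PySem.Set.ofList (imgs.filter (fun i => !(r.contains i)))).length
              ≤ (freeOf u).length) :
    (imgs.foldl (fun st image =>
      if st.2.contains image then st
      else
        let free_number := find_free_number st.1
        (PySem.Set.add st.1 free_number,
         st.2.insert image (newName free_number image))) (u, r)).2.items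
    = r.items ++ (((PySem.Set.ofList (imgs.filter (fun i => !(r.contains i)))).zip
        (freeOf u)).map (fun q => (q.1, newName q.2 q.1))) := by
  induction imgs generalizing u r with
  | nil => simp [PySem.Set.ofList_nil]
  | cons img rest ih =>
    by_cases hc : r.contains img = true
    · have hfil : List.filter (fun i => !(r.contains i)) (img :: rest)
          = List.filter (fun i => !(r.contains i)) rest := by
        rw [List.filter_cons]; simp [hc]
      rw [hfil] at hlen ⊢
      rw [List.foldl_cons]
      simp only [hc, if_true]
      exact ih u r hnd hlen
    · have hcb : r.contains img = false := by simpa using hc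
      have hfil : List.filter (fun i => !(r.contains i)) (img :: rest)
          = img :: List.filter (fun i => !(r.contains i)) rest := by
        rw [List.filter_cons]; simp [hcb]
      rw [hfil] at hlen ⊢
      rw [PySem.Set.ofList_cons] at hlen ⊢
      have hne : freeOf u ≠ [] := by
        intro h0; rw [h0] at hlen; simp at hlen
      obtain ⟨f, free', hfe⟩ := List.exists_cons_of_ne_nil hne
      have hfind : find_free_number u = f := by
        unfold find_free_number
        rw [← List.head?_filter]
        show (match (freeOf u).head? with | some i => i | none => (100 : Int)) = f
        rw [hfe]
        rfl
      have hndfree : (freeOf u).Nodup := (PySem.List.nodup_pyRange_one 0 100).filter _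
      have hfnotin : f ∉ free' := by
        rw [hfe] at hndfree
        exact (List.nodup_cons.mp hndfree).1
      have hfree' : freeOf (PySem.Set.add u f) = free' := by
        unfold freeOf
        have hstep : ∀ i, (!(PySem.Set.contains (PySem.Set.add u f) i))
            = ((!(PySem.Set.contains u i)) && !(i == f)) := by
          intro i; rw [contains_add_eq]; cases PySem.Set.contains u i <;> simp
        calc (PySem.List.pyRange 0 100 1).filter
              (fun i => !(PySem.Set.contains (PySem.Set.add u f) i))
            = ((PySem.List.pyRange 0 100 1).filter
                (fun i => !(PySem.Set.contains u i))).filter (fun i => !(i == f)) := by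
              rw [List.filter_filter]
              exact List.filter_congr (fun i _ => by rw [hstep i, Bool.and_comm])
          _ = (f :: free').filter (fun i => !(i == f)) := by rw [← hfe]; rfl
          _ = free' := by
              rw [List.filter_cons]
              simp only [beq_self_eq_true, Bool.not_true, Bool.false_eq_true, if_false]
              refine List.filter_eq_self.mpr ?_
              intro i hi
              have hif : i ≠ f := fun h => hfnotin (h ▸ hi)
              simp [hif]
      have hrest : rest.filter (fun i => !((r.insert img (newName f img)).contains i))
          = (rest.filter (fun i => !(r.contains i))).filter (fun i => !(i == img)) := by
        rw [List.filter_filter]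
        apply List.filter_congr
        intro i _
        rw [PySem.Dict.contains_insert]
        cases h1 : r.contains i <;> cases h2 : i == img <;> simp
      have hkeys : (r.insert img (newName f img)).keys.Nodup :=
        PySem.Dict.nodup_keys_insert r img _ hnd
      have hfresh : PySem.Set.ofList
            (rest.filter (fun i => !((r.insert img (newName f img)).contains i)))
          = PySem.Set.discard
              (PySem.Set.ofList (rest.filter (fun i => !(r.contains i)))) img := by
        rw [hrest, ofList_filter_ne, discard_eq_filter]
      have hlen' : (PySem.Set.ofList
            (rest.filter (fun i => !((r.insert img (newName f img)).contains i)))).length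
          ≤ (freeOf (PySem.Set.add u f)).length := by
        rw [hfresh, hfree']
        rw [hfe] at hlen
        simp only [List.length_cons] at hlen
        omega
      rw [List.foldl_cons]
      simp only [hcb, Bool.false_eq_true, if_false, hfind]
      rw [ih (PySem.Set.add u f) (r.insert img (newName f img)) hkeys hlen']
      rw [PySem.Dict.items_insert_of_not_contains r (newName f img) hcb]
      rw [hfresh, hfree', hfe]
      simp [List.zip_cons_cons]

theorem newName_eq : newName_alt = newName := by
  funext n image
  unfold newName_alt newName
  rw [clean_eq]

-- ===== VERDICT (by name: the statement is the Claim_ definition above) =====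
theorem convert_names_spec : Claim_equal_convert_names := by
  intro images _hdom hpre
  unfold Pre_convert_names at hpre
  unfold Spec_convert_names convert_names convert_names_alt
  rw [numbered_eq, parse_eq, newName_eq]
  dsimp only
  rw [pass1_split]
  -- names for the two pass-1 results
  set u1 := images.foldl (fun u image =>
      if is_already_numbered image then PySem.Set.add u (parse2 image) else u)
      PySem.Set.empty with hu1def
  set kept := images.foldl (fun d image =>
      if is_already_numbered image then d.insert image image else d)
      PySem.Dict.empty with hkeptdef
  have hkeptfilter : kept = (images.filter (fun i => is_already_numbered i)).foldl
      (fun d x => d.insert x x) PySem.Dict.empty := by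
    rw [hkeptdef, PySem.List.foldl_if_eq_foldl_filter]
  have hkeys : kept.keys = PySem.Set.ofList (images.filter (fun i => is_already_numbered i)) := by
    rw [hkeptfilter, PySem.Dict.keys_foldl_insert]
    rfl
  have hndk : kept.keys.Nodup := by
    rw [hkeys]; exact PySem.Set.nodup_ofList _
  have hu1 : u1 = PySem.Set.ofList
      ((images.filter (fun i => is_already_numbered i)).map parse2) := by
    rw [hu1def, PySem.List.foldl_if_eq_foldl_filter, ← PySem.Set.update_map_eq_foldl_add]
    rfl
  have husedmem : ∀ i : Int,
      i ∈ PySem.Set.ofList (kept.keys.map parse2) ↔ i ∈ u1 := by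
    intro i
    rw [hu1, hkeys]
    simp only [PySem.Set.mem_ofList, List.mem_map]
  have hfreeB : (PySem.List.pyRange 0 100 1).filter
      (fun i => !(PySem.Set.contains (PySem.Set.ofList (kept.keys.map parse2)) i))
      = freeOf u1 := by
    unfold freeOf
    exact List.filter_congr (fun i _ => by rw [contains_congr husedmem i])
  have hfresh : images.filter (fun img => !(kept.contains img))
      = images.filter (fun img => !(is_already_numbered img)) := by
    apply List.filter_congr
    intro img hmem
    have : kept.contains img = is_already_numbered img := by
      rw [PySem.Dict.contains_eq_decide_mem_keys, hkeys]
      by_cases hp : is_already_numbered img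
      · rw [hp]
        simp only [decide_eq_true_eq, PySem.Set.mem_ofList, List.mem_filter]
        exact ⟨hmem, hp⟩
      · simp only [hp]
        simp only [decide_eq_false_iff_not, PySem.Set.mem_ofList, List.mem_filter]
        intro hcon
        exact absurd hcon.2 (by simpa using hp)
    rw [this]
  have hlen : (PySem.Set.ofList
        (images.filter (fun i => !(kept.contains i)))).length ≤ (freeOf u1).length := by
    have h1 := length_freeOf_ge u1
    have h2 : u1.length = (PySem.Set.ofList
        ((images.filter (fun i => is_already_numbered i)).map parse2)).length := by
      rw [hu1]
    rw [hfresh]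
    omega
  rw [pass2_items images u1 kept hndk hlen, hfreeB, hfresh]
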